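-- pv_equiv track=rewrite | github.com/oumao/codewarskatas | alternate_values.py | alternate_values
-- ===== SOURCE A (Python) =====
-- def alternate_values(n, first_value, second_value):
--     arr = []
--     while len(arr) < n:
--         arr.append(first_value)
--         arr.append(second_value)
--         if len(arr) > n:
--             arr.pop()
--     return arr
-- ===== SOURCE B (Python) =====
-- def alternate_values(n, first_value, second_value):
--     return [first_value if i % 2 == 0 else second_value for i in range(n)]
-- ===== Notes on version B (the rewrite author's own statement) =====
-- stated objective: simpler
-- what changed: Replaces A's while-loop that appends a pair each iteration and corrects overshoot with pop by a single comprehension over range(n) choosing the value by index parity.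
import Mathlib
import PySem

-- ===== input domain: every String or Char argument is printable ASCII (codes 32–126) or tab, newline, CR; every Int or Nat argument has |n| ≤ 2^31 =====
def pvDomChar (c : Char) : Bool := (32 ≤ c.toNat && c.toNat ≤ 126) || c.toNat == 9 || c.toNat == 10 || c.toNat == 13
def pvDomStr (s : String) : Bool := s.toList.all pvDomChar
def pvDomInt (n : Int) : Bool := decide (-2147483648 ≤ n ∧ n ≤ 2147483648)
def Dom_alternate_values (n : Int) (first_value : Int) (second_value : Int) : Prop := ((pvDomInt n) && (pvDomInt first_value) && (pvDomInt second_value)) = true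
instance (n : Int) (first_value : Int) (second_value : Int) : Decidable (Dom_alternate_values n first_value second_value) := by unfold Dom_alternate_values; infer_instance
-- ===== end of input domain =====

-- B builds the list in one pass over range(n) choosing by index parity, instead of A's
-- append-two-then-pop loop; objective: simpler.

-- ===== PORT A =====
-- while len(arr) < n: arr.append(f); arr.append(s); if len(arr) > n: arr.pop()
def alternate_values_loop (n fv sv : Int) (arr : List Int) : List Int :=
  if (arr.length : Int) < n then
    alternate_values_loop n fv sv
      (if ((arr ++ [fv, sv]).length : Int) > n then (arr ++ [fv, sv]).dropLast
       else arr ++ [fv, sv])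
  else arr
termination_by (n - arr.length).toNat
decreasing_by
  split <;>
    simp only [List.length_dropLast, List.length_append, List.length_cons, List.length_nil] <;>
    omega

def alternate_values (n : Int) (first_value : Int) (second_value : Int) : List Int :=
  alternate_values_loop n first_value second_value []

-- ===== PORT B =====
def alternate_values_alt (n : Int) (first_value : Int) (second_value : Int) : List Int :=
  (PySem.List.pyRange 0 n 1).map (fun i => if PySem.Int.mod i 2 = 0 then first_value else second_value)

-- ===== PRECONDITION & SPEC =====
def Spec_alternate_values (n : Int) (first_value : Int) (second_value : Int) (out : List Int) : Prop := out = alternate_values_alt n first_value second_value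
instance (n : Int) (first_value : Int) (second_value : Int) (out : List Int) : Decidable (Spec_alternate_values n first_value second_value out) := by unfold Spec_alternate_values; infer_instance

-- ===== CLAIM (what is proved, stated in full; the proofs are below) =====
def Claim_equal_alternate_values : Prop := ∀ (n : Int) (first_value : Int) (second_value : Int), Dom_alternate_values n first_value second_value → Spec_alternate_values n first_value second_value (alternate_values n first_value second_value)

-- ===== LEMMAS AND PROOFS =====

-- the alternating pattern of length m, indexed from 0
def pat (fv sv : Int) (m : Nat) : List Int :=
  (List.range m).map (fun i => if i % 2 = 0 then fv else sv)

theorem pat_length (fv sv : Int) (m : Nat) : (pat fv sv m).length = m := by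
  simp [pat]

theorem pat_succ (fv sv : Int) (m : Nat) :
    pat fv sv (m + 1) = pat fv sv m ++ [if m % 2 = 0 then fv else sv] := by
  simp [pat, List.range_succ]

theorem pat_dropLast (fv sv : Int) (m : Nat) : (pat fv sv (m + 1)).dropLast = pat fv sv m := by
  rw [pat_succ]; simp

-- B's port equals pat applied to n.toNat
theorem alt_eq_pat (n fv sv : Int) : alternate_values_alt n fv sv = pat fv sv n.toNat := by
  unfold alternate_values_alt pat
  rw [PySem.List.pyRange_one, List.map_map]
  have hn : (n - 0).toNat = n.toNat := by omega
  rw [hn]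
  apply List.map_congr_left
  intro i _
  simp only [Function.comp]
  have h2 : PySem.Int.mod (0 + (i : Int)) 2 = ((i % 2 : Nat) : Int) := by
    rw [zero_add]; exact_mod_cast PySem.Int.mod_natCast i 2
  rw [h2]
  simp only [show (((i % 2 : Nat) : Int) = 0) ↔ i % 2 = 0 from by omega]

-- loop invariant: starting from an even-length alternating prefix, the loop completes it
theorem loop_pat (n fv sv : Int) (k : Nat) (hk : k % 2 = 0) (hle : (k : Int) ≤ n) :
    alternate_values_loop n fv sv (pat fv sv k) = pat fv sv n.toNat := by
  by_cases hlt : (k : Int) < n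
  · rw [alternate_values_loop.eq_def]
    rw [if_pos (by rw [pat_length]; exact hlt)]
    have h2 : pat fv sv k ++ [fv, sv] = pat fv sv (k + 2) := by
      rw [pat_succ, pat_succ, hk]
      have : (k + 1) % 2 = 1 := by omega
      simp [this]
    rw [h2, pat_length]
    by_cases hgt : ((k : Int) + 2) > n
    · have hn : n = (k : Int) + 1 := by omega
      rw [if_pos (by push_cast; omega), pat_dropLast]
      rw [alternate_values_loop.eq_def]
      simp only [pat_length]
      rw [if_neg (by omega)]
      congr 1; omega
    · rw [if_neg (by push_cast; omega)]
      exact loop_pat n fv sv (k + 2) (by omega) (by push_cast; omega)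
  · rw [alternate_values_loop.eq_def]
    simp only [pat_length]
    rw [if_neg hlt]
    congr 1; omega
termination_by (n - k).toNat
decreasing_by omega

-- ===== VERDICT (by name: the statement is the Claim_ definition above) =====
theorem alternate_values_spec : Claim_equal_alternate_values := by
  intro n fv sv _
  unfold Spec_alternate_values alternate_values
  rw [alt_eq_pat]
  have h0 : pat fv sv 0 = [] := by simp [pat]
  by_cases hn : (0 : Int) ≤ n
  · rw [← h0]; exact loop_pat n fv sv 0 (by omega) (by omega)
  · rw [alternate_values_loop.eq_def]
    simp only [List.length_nil]
    rw [if_neg (by omega)]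
    have : n.toNat = 0 := by omega
    rw [this, h0]
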